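-- pv_equiv track=rewrite | github.com/Sarakael78/Bridge-Search | bridge_search/path_policy.py | _split_prefix_blob
-- ===== SOURCE A (Python) =====
-- from typing import List, Optional, Tuple
--
-- def _split_prefix_blob(raw: str) -> List[str]:
--     """Split an env prefix list on ':' or ';' without breaking Windows drive letters."""
--     parts: List[str] = []
--     current: List[str] = []
--     for idx, ch in enumerate(raw):
--         if ch in ":;":
--             next_ch = raw[idx + 1] if idx + 1 < len(raw) else ""
--             current_text = "".join(current).strip()
--             is_drive_colon = ch == ":" and len(current_text) == 1 and current_text.isalpha() and next_ch in ("\\", "/")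
--             if is_drive_colon:
--                 current.append(ch)
--                 continue
--             part = current_text
--             if part:
--                 parts.append(part)
--             current = []
--             continue
--         current.append(ch)
--     tail = "".join(current).strip()
--     if tail:
--         parts.append(tail)
--     return parts
-- ===== SOURCE B (Python) =====
-- from typing import List, Tuple
--
-- def _tokenize(raw: str) -> Tuple[str, List[Tuple[str, str]]]:
--     """Right-to-left tokenize: head text plus (delimiter, text-after-it) pairs."""
--     head = ''
--     pairs: List[Tuple[str, str]] = []
--     for ch in reversed(raw):
--         if ch in ':;':
--             pairs.append((ch, head))
--             head = ''
--         else: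
--             head = ch + head
--     pairs.reverse()
--     return head, pairs
--
-- def _split_prefix_blob(raw: str) -> List[str]:
--     """Split an env prefix list on ':' or ';' without breaking Windows drive letters."""
--     seg, pairs = _tokenize(raw)
--     parts: List[str] = []
--     for delim, nxt in pairs:
--         s = seg.strip()
--         if delim == ':' and len(s) == 1 and s.isalpha() and nxt[:1] in ('\\', '/'):
--             seg = seg + delim + nxt
--         else:
--             if s:
--                 parts.append(s)
--             seg = nxt
--     s = seg.strip()
--     if s:
--         parts.append(s)
--     return parts
-- ===== Notes on version B (the rewrite author's own statement) =====
-- stated objective: alternative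
-- what changed: B replaces A's single indexed character loop with one-char lookahead (raw[idx+1]) by a two-phase decomposition: first tokenize the string into a head text plus (delimiter, following-text) pairs, then fold over that token list merging drive-colon segments and flushing stripped parts.
import Mathlib
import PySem

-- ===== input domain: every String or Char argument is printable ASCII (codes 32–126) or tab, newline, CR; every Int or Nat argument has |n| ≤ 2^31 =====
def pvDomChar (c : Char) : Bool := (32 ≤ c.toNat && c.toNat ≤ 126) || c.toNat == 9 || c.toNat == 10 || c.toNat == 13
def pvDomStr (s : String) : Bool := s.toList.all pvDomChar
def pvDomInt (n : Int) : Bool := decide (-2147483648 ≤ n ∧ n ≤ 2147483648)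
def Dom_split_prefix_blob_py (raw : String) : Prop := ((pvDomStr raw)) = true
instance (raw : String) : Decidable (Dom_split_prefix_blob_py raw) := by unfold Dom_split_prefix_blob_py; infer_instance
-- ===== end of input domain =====

-- B re-decomposes A's indexed one-pass scan into tokenize-then-merge (head text + (delimiter, following-text) pairs); equal return values on Dom, similar cost ("alternative").


-- ===== PORT A =====
-- next_ch = raw[idx + 1] if idx + 1 < len(raw) else "" ; next_ch in ("\\", "/").
-- On the remaining-suffix recursion, raw[idx+1] is exactly the head of the tail
-- (and "" when the tail is empty), so the test is exact.
def pvA_nextSlash : List Char → Bool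
  | [] => false
  | c :: _ => c == '\\' || c == '/'

-- the 'for idx, ch in enumerate(raw)' loop, state (parts, current), as structural recursion
def pvA_loop : List Char → List String → List Char → List String × List Char
  | [], parts, current => (parts, current)
  | ch :: tl, parts, current =>
    if ch = ':' ∨ ch = ';' then
      let currentText := PySem.Chars.strip current
      if ch = ':' ∧ currentText.length = 1 ∧ PySem.Chars.strIsalpha currentText = true
          ∧ pvA_nextSlash tl = true then
        pvA_loop tl parts (current ++ [ch])
      else
        pvA_loop tl (if currentText ≠ [] then parts ++ [String.ofList currentText] else parts) []
    else
      pvA_loop tl parts (current ++ [ch])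

def split_prefix_blob_py (raw : String) : List String :=
  let r := pvA_loop raw.toList [] []
  let tail := PySem.Chars.strip r.2
  if tail ≠ [] then r.1 ++ [String.ofList tail] else r.1

-- ===== PORT B =====
-- _tokenize: Source B scans reversed(raw) accumulating the text to the right; the structural
-- recursion below is that same right-to-left computation (pairs already in forward order).
def pvTokenize : List Char → List Char × List (Char × List Char)
  | [] => ([], [])
  | ch :: tl =>
    let r := pvTokenize tl
    if ch = ':' ∨ ch = ';' then ([], (ch, r.1) :: r.2)
    else (ch :: r.1, r.2)

-- nxt[:1] in ('\\', '/') : first character of nxt (no char when nxt = '')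
def pvB_first1Slash : List Char → Bool
  | [] => false
  | c :: _ => c == '\\' || c == '/'

-- the 'for delim, nxt in pairs' loop, state (parts, seg)
def pvB_loop : List (Char × List Char) → List Char → List String → List String × List Char
  | [], seg, parts => (parts, seg)
  | (delim, nxt) :: rest, seg, parts =>
    let s := PySem.Chars.strip seg
    if delim = ':' ∧ s.length = 1 ∧ PySem.Chars.strIsalpha s = true ∧ pvB_first1Slash nxt = true then
      pvB_loop rest (seg ++ [delim] ++ nxt) parts
    else
      pvB_loop rest nxt (if s ≠ [] then parts ++ [String.ofList s] else parts)

def split_prefix_blob_py_alt (raw : String) : List String :=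
  let t := pvTokenize raw.toList
  let r := pvB_loop t.2 t.1 []
  let s := PySem.Chars.strip r.2
  if s ≠ [] then r.1 ++ [String.ofList s] else r.1

-- ===== PRECONDITION & SPEC =====
def Spec_split_prefix_blob_py (raw : String) (out : List String) : Prop := out = split_prefix_blob_py_alt raw
instance (raw : String) (out : List String) : Decidable (Spec_split_prefix_blob_py raw out) := by unfold Spec_split_prefix_blob_py; infer_instance

-- ===== CLAIM (what is proved, stated in full; the proofs are below) =====
def Claim_equal_split_prefix_blob_py : Prop := ∀ (raw : String), Dom_split_prefix_blob_py raw → Spec_split_prefix_blob_py raw (split_prefix_blob_py raw)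

-- ===== LEMMAS AND PROOFS =====

-- final strip-and-flush applied to a loop state (parts, pending-text)
def pvFin (r : List String × List Char) : List String :=
  if PySem.Chars.strip r.2 ≠ [] then r.1 ++ [String.ofList (PySem.Chars.strip r.2)] else r.1

theorem pv_first1_eq_next (tl : List Char) :
    pvB_first1Slash (pvTokenize tl).1 = pvA_nextSlash tl := by
  cases tl with
  | nil => rfl
  | cons c t =>
    by_cases h : c = ':' ∨ c = ';'
    · have hc : (c == '\\' || c == '/') = false := by
        rcases h with h | h <;> subst h <;> rfl
      simp [pvTokenize, h, pvB_first1Slash, pvA_nextSlash, hc]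
    · simp [pvTokenize, h, pvB_first1Slash, pvA_nextSlash]

theorem pv_key (cs : List Char) : ∀ (parts : List String) (current : List Char),
    pvFin (pvA_loop cs parts current)
      = pvFin (pvB_loop (pvTokenize cs).2 (current ++ (pvTokenize cs).1) parts) := by
  induction cs with
  | nil => intro parts current; simp [pvA_loop, pvTokenize, pvB_loop]
  | cons ch tl ih =>
    intro parts current
    by_cases hd : ch = ':' ∨ ch = ';'
    · -- delimiter character
      simp only [pvTokenize, hd, if_pos, pvA_loop, pvB_loop]
      rw [pv_first1_eq_next]
      by_cases hdr : ch = ':' ∧ (PySem.Chars.strip current).length = 1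
          ∧ PySem.Chars.strIsalpha (PySem.Chars.strip current) = true ∧ pvA_nextSlash tl = true
      · obtain ⟨hch, h1, h2, h3⟩ := hdr
        subst hch
        simp only [h1, h2, h3, and_self, if_true, List.append_nil]
        rw [ih parts (current ++ [':'])]
      · simp only [List.append_nil, hdr, if_false]
        rw [ih (if PySem.Chars.strip current ≠ [] then parts ++ [String.ofList (PySem.Chars.strip current)] else parts) []]
        simp
    · -- ordinary character
      simp only [pvTokenize, hd, if_neg, not_false_eq_true, pvA_loop]
      rw [ih parts (current ++ [ch])]
      simp

-- ===== VERDICT (by name: the statement is the Claim_ definition above) =====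
theorem split_prefix_blob_py_spec : Claim_equal_split_prefix_blob_py := by
  intro raw _
  show split_prefix_blob_py raw = split_prefix_blob_py_alt raw
  have h := pv_key raw.toList [] []
  simpa [split_prefix_blob_py, split_prefix_blob_py_alt, pvFin] using h
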